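-- pv_equiv track=rewrite | github.com/phongdz-cloud/Python | Lesson9/Bai16.py | checkEvenArray
-- ===== SOURCE A (Python) =====
-- def checkEvenArray(A, index):
--     k = -1
--     for i in range(index + 1, len(A)):
--         if A[i] % 2 == 0 and A[i] != 0:
--             return i
--         if A[i] == 0:
--             k = i
--     return k
-- ===== SOURCE B (Python) =====
-- def checkEvenArray(A, index):
--     for i in range(index + 1, len(A)):
--         if A[i] % 2 == 0 and A[i] != 0:
--             return i
--     for i in range(len(A) - 1, index, -1):
--         if A[i] == 0:
--             return i
--     return -1
-- ===== Notes on version B (the rewrite author's own statement) =====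
-- stated objective: alternative
-- what changed: Replaces A's single interleaved pass with a last-zero accumulator by two independent passes: a forward scan returning the first even-nonzero index, then a reverse scan returning the first (i.e. last) zero index, with no accumulator.
import Mathlib
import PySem

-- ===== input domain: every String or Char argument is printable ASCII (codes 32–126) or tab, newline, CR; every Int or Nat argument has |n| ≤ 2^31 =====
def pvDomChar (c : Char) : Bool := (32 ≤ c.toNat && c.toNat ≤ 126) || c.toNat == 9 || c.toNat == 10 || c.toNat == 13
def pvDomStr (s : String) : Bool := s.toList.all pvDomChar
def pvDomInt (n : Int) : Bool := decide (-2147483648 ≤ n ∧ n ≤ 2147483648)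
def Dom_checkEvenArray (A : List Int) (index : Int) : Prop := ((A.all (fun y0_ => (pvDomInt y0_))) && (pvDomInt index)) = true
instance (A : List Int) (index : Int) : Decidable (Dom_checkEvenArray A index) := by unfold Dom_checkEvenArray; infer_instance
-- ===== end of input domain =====

-- B replaces A's single interleaved pass (with a last-zero accumulator) by two independent
-- passes: a forward scan for the first even-nonzero index, then a reverse scan for the last zero.


-- ===== PORT A =====
-- the two tests A applies to A[i] (out-of-range reads are excluded by Pre_ below)
def pEven (A : List Int) (i : Int) : Bool :=
  PySem.Int.mod (PySem.List.pyGetD A i 0) 2 == 0 && PySem.List.pyGetD A i 0 != 0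
def pZero (A : List Int) (i : Int) : Bool := PySem.List.pyGetD A i 0 == 0

-- A's loop over range(index+1, len(A)) with accumulator k (last zero index so far)
def checkEvenArrayLoop (A : List Int) (r : List Int) (k : Int) : Int :=
  match r with
  | [] => k
  | i :: rest =>
    if pEven A i then i
    else if pZero A i then checkEvenArrayLoop A rest i
    else checkEvenArrayLoop A rest k

def checkEvenArray (A : List Int) (index : Int) : Int :=
  checkEvenArrayLoop A (PySem.List.pyRange (index + 1) (A.length : Int) 1) (-1)

-- ===== PORT B =====
-- pass 1: first even-nonzero index in range(index+1, len(A))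
-- pass 2: first zero index in range(len(A)-1, index, -1); else -1
def checkEvenArray_alt (A : List Int) (index : Int) : Int :=
  match (PySem.List.pyRange (index + 1) (A.length : Int) 1).find? (pEven A) with
  | some i => i
  | none =>
    match (PySem.List.pyRange ((A.length : Int) - 1) index (-1)).find? (pZero A) with
    | some i => i
    | none => -1

-- ===== PRECONDITION & SPEC =====
-- Pre_ excludes exactly the inputs where Python A raises IndexError: index + 1 < -len(A),
-- where the first subscript A[index+1] is a negative index past the front of the list.
def Pre_checkEvenArray (A : List Int) (index : Int) : Prop := -(A.length : Int) - 1 ≤ index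
instance (A : List Int) (index : Int) : Decidable (Pre_checkEvenArray A index) := by unfold Pre_checkEvenArray; infer_instance
def pvWitness_checkEvenArray : List Int × Int := ([1, 3, 4, 0], 0)

def Spec_checkEvenArray (A : List Int) (index : Int) (out : Int) : Prop := out = checkEvenArray_alt A index
instance (A : List Int) (index : Int) (out : Int) : Decidable (Spec_checkEvenArray A index out) := by unfold Spec_checkEvenArray; infer_instance

-- ===== CLAIM (what is proved, stated in full; the proofs are below) =====
def Claim_equal_checkEvenArray : Prop := ∀ (A : List Int) (index : Int), Dom_checkEvenArray A index → Pre_checkEvenArray A index → Spec_checkEvenArray A index (checkEvenArray A index)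

-- ===== LEMMAS AND PROOFS =====

-- A's interleaved loop = first match of the even-nonzero test, else last match of the zero test
-- (first match of the reversed list), else the accumulator k.
theorem checkEvenArrayLoop_eq (A : List Int) (r : List Int) (k : Int) :
    checkEvenArrayLoop A r k =
      match r.find? (pEven A) with
      | some i => i
      | none =>
        match r.reverse.find? (pZero A) with
        | some i => i
        | none => k := by
  induction r generalizing k with
  | nil => simp [checkEvenArrayLoop]
  | cons i rest ih =>
    simp only [checkEvenArrayLoop, List.find?, List.reverse_cons, List.find?_append]
    cases hp : pEven A i with
    | true => simp [hp]
    | false =>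
      simp only [hp, Bool.false_eq_true, if_false]
      cases hz : pZero A i with
      | true =>
        simp only [hz, if_true, ih]
        cases rest.find? (pEven A) with
        | some j => simp
        | none =>
          cases h2 : rest.reverse.find? (pZero A) with
          | some j => simp [h2]
          | none => simp [h2, List.find?, hz]
      | false =>
        simp only [hz, Bool.false_eq_true, if_false, ih]
        cases rest.find? (pEven A) with
        | some j => simp
        | none =>
          cases h2 : rest.reverse.find? (pZero A) with
          | some j => simp [h2]
          | none => simp [h2, List.find?, hz]

-- ===== VERDICT (by name: the statement is the Claim_ definition above) =====
theorem checkEvenArray_spec : Claim_equal_checkEvenArray := by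
  intro A index _ _
  unfold Spec_checkEvenArray checkEvenArray checkEvenArray_alt
  rw [checkEvenArrayLoop_eq]
  rw [show PySem.List.pyRange ((A.length : Int) - 1) index (-1)
        = (PySem.List.pyRange (index + 1) (A.length : Int) 1).reverse from by
      rw [PySem.List.pyRange_neg_one_eq_reverse]; ring_nf]
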